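-- pv_equiv track=rewrite | github.com/alexogeny/advent-of-code-2023 | day_1/part_2.py | find_numberlike_values
-- ===== SOURCE A (Python) =====
-- NUMBER_MAP = {
--     "one": "1",
--     "two": "2",
--     "three": "3",
--     "four": "4",
--     "five": "5",
--     "six": "6",
--     "seven": "7",
--     "eight": "8",
--     "nine": "9",
-- }
--
-- def find_numberlike_values(input_line):
--     result = []
--     i = 0
--     while i < len(input_line):
--         if input_line[i].isdigit():
--             result.append(input_line[i])
--             i += 1
--             continue
--
--         # you would think a regexp would be better here, but it's not
--         # it consumes tokens that we might need in the case of overlapping words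
--         # so instead we use a simple loop / sliding window approach
--         for word, number in NUMBER_MAP.items():
--             if input_line[i : i + len(word)] == word:
--                 result.append(number)
--                 i += 1
--                 break
--         else:
--             i += 1
--
--     return result
-- ===== SOURCE B (Python) =====
-- NUMBER_MAP = {
--     "one": "1",
--     "two": "2",
--     "three": "3",
--     "four": "4",
--     "five": "5",
--     "six": "6",
--     "seven": "7",
--     "eight": "8",
--     "nine": "9",
-- }
--
--
-- def find_numberlike_values(input_line):
--     # Build a full occurrence table (index, value), then read it off in index order.
--     pairs = []
--     for word, number in NUMBER_MAP.items():
--         for j in range(len(input_line)):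
--             if input_line[j:j + len(word)] == word:
--                 pairs.append((j, number))
--     for i in range(len(input_line)):
--         ch = input_line[i]
--         if ch.isdigit():
--             pairs.append((i, ch))
--     pairs.sort(key=lambda p: p[0])
--     return [value for _, value in pairs]
-- ===== Notes on version B (the rewrite author's own statement) =====
-- stated objective: alternative
-- what changed: B builds a complete (index, value) occurrence table (one scan per number word plus one digit scan) and then sorts it by index and extracts the values, instead of A's single left-to-right sliding-window scan with an inner first-match loop and break.
import Mathlib
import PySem

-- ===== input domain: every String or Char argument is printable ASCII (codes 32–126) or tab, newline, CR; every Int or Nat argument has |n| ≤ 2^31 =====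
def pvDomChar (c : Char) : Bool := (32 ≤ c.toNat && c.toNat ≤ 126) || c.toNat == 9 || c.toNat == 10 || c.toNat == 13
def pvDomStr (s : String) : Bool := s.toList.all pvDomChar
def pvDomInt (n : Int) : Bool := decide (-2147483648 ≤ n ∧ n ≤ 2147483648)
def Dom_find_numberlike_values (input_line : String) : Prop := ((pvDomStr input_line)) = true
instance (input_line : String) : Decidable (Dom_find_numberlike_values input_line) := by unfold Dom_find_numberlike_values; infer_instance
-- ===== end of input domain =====

-- B builds a full (index, value) occurrence table and sorts it by index instead of A's
-- single left-to-right sliding scan (objective: alternative; no speed claim).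

-- ===== PORT A =====
-- NUMBER_MAP.items() in insertion order; words as List Char for the slice comparisons.
def pvNumWords : List (List Char × String) :=
  [(['o','n','e'], "1"), (['t','w','o'], "2"), (['t','h','r','e','e'], "3"),
   (['f','o','u','r'], "4"), (['f','i','v','e'], "5"), (['s','i','x'], "6"),
   (['s','e','v','e','n'], "7"), (['e','i','g','h','t'], "8"), (['n','i','n','e'], "9")]

-- A's inner 'for word, number … if slice == word: break' loop: first matching entry.
-- input_line[i : i+len(word)] with in-range 0 ≤ i is exactly (suffix at i).take (len word).
def pvFirstWordA : List (List Char × String) → List Char → Option String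
  | [], _ => none
  | (w, num) :: rest, suf => if suf.take w.length = w then some num else pvFirstWordA rest suf

-- A's while loop advances i by exactly 1 in every branch, so it is recursion on the suffix.
def pvLoopA : List Char → List String
  | [] => []
  | c :: rest =>
      if PySem.Chars.isdigit c then String.ofList [c] :: pvLoopA rest
      else
        match pvFirstWordA pvNumWords (c :: rest) with
        | some num => num :: pvLoopA rest
        | none => pvLoopA rest

def find_numberlike_values (input_line : String) : List String := pvLoopA input_line.toList

-- ===== PORT B =====
-- Source B's per-word scan: all j with input_line[j:j+len(word)] == word, tagged with the number.
def pvOccPairs (cs : List Char) : List (Nat × String) :=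
  pvNumWords.flatMap (fun p =>
    ((List.range cs.length).filter (fun j => (cs.drop j).take p.1.length == p.1)).map
      (fun j => (j, p.2)))

-- Source B's digit scan: (i, input_line[i]) for each digit position (i < len, so getD is s[i]).
def pvDigitPairs (cs : List Char) : List (Nat × String) :=
  (List.range cs.length).filterMap (fun i =>
    if PySem.Chars.isdigit (cs.getD i ' ') then some (i, String.ofList [cs.getD i ' ']) else none)

def find_numberlike_values_alt (input_line : String) : List String :=
  let cs := input_line.toList
  (PySem.List.sorted (pvOccPairs cs ++ pvDigitPairs cs) (fun p => p.1) false).map (fun p => p.2)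

-- ===== PRECONDITION & SPEC =====
def Spec_find_numberlike_values (input_line : String) (out : List String) : Prop := out = find_numberlike_values_alt input_line
instance (input_line : String) (out : List String) : Decidable (Spec_find_numberlike_values input_line out) := by unfold Spec_find_numberlike_values; infer_instance

-- ===== CLAIM (what is proved, stated in full; the proofs are below) =====
def Claim_equal_find_numberlike_values : Prop := ∀ (input_line : String), Dom_find_numberlike_values input_line → Spec_find_numberlike_values input_line (find_numberlike_values input_line)

-- ===== LEMMAS AND PROOFS =====

-- the value A produces at one position (decided by the suffix there), if any
def pvMSuf (suf : List Char) : Option String :=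
  match suf with
  | [] => none
  | c :: _ => if PySem.Chars.isdigit c then some (String.ofList [c]) else pvFirstWordA pvNumWords suf

-- the ideal occurrence table, already in index order
def pvE (cs : List Char) : List (Nat × String) :=
  (List.range cs.length).filterMap (fun i => (pvMSuf (cs.drop i)).map (fun v => (i, v)))

theorem pvLoopA_eq (cs : List Char) :
    pvLoopA cs = (List.range cs.length).filterMap (fun i => pvMSuf (cs.drop i)) := by
  induction cs with
  | nil => simp [pvLoopA]
  | cons c rest ih =>
    rw [List.length_cons, List.range_succ_eq_map, List.filterMap_cons, List.filterMap_map]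
    have h2 : ((fun i => pvMSuf ((c :: rest).drop i)) ∘ Nat.succ) = fun i => pvMSuf (rest.drop i) := by
      funext i; simp
    rw [h2, ← ih]
    by_cases hd : PySem.Chars.isdigit c
    · simp [pvLoopA, pvMSuf, hd]
    · cases hfw : pvFirstWordA pvNumWords (c :: rest) with
      | some v => simp [pvLoopA, pvMSuf, hd, hfw]
      | none => simp [pvLoopA, pvMSuf, hd, hfw]

-- no number word is a (take-)prefix of another
theorem pv_words_unique : ∀ p ∈ pvNumWords, ∀ q ∈ pvNumWords,
    q.1.take p.1.length = p.1 → p = q := by decide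

theorem pv_words_shape : ∀ p ∈ pvNumWords,
    p.1 ≠ [] ∧ PySem.Chars.isdigit p.1.headI = false := by decide

-- at most one word matches at a given suffix
theorem pv_match_unique {l : List Char} {p q : List Char × String}
    (hp : p ∈ pvNumWords) (hq : q ∈ pvNumWords)
    (hmp : l.take p.1.length = p.1) (hmq : l.take q.1.length = q.1) : p = q := by
  rcases Nat.le_total p.1.length q.1.length with h | h
  · apply pv_words_unique p hp q hq
    rw [← hmq, List.take_take, Nat.min_eq_left h, hmp]
  · exact (pv_words_unique q hq p hp (by rw [← hmp, List.take_take, Nat.min_eq_left h, hmq])).symm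

-- a digit position matches no word
theorem pv_digit_no_match {c : Char} {t : List Char} {p : List Char × String}
    (hp : p ∈ pvNumWords) (hd : PySem.Chars.isdigit c = true)
    (hm : (c :: t).take p.1.length = p.1) : False := by
  obtain ⟨hne, hhd⟩ := pv_words_shape p hp
  cases hp1 : p.1 with
  | nil => exact hne hp1
  | cons a w =>
    rw [hp1] at hm
    rw [List.length_cons, List.take_succ_cons] at hm
    have hca : c = a := (List.cons.injEq _ _ _ _ ▸ hm).1
    rw [hp1] at hhd
    simp only [List.headI] at hhd
    rw [← hca, hd] at hhd
    exact Bool.true_eq_false.mp hhd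

theorem pvFirstWordA_some {ws : List (List Char × String)} {l : List Char} {v : String}
    (h : pvFirstWordA ws l = some v) : ∃ p ∈ ws, p.2 = v ∧ l.take p.1.length = p.1 := by
  induction ws with
  | nil => simp [pvFirstWordA] at h
  | cons q rest ih =>
    obtain ⟨w, num⟩ := q
    by_cases hm : l.take w.length = w
    · simp only [pvFirstWordA, hm, if_pos] at h
      exact ⟨(w, num), List.mem_cons_self, by simpa using h, hm⟩
    · simp only [pvFirstWordA, hm, if_false] at h
      obtain ⟨p, hp, hv, hmm⟩ := ih h
      exact ⟨p, List.mem_cons_of_mem _ hp, hv, hmm⟩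

theorem pvFirstWordA_none {ws : List (List Char × String)} {l : List Char}
    (h : pvFirstWordA ws l = none) : ∀ p ∈ ws, l.take p.1.length ≠ p.1 := by
  induction ws with
  | nil => simp
  | cons q rest ih =>
    obtain ⟨w, num⟩ := q
    by_cases hm : l.take w.length = w
    · simp [pvFirstWordA, hm] at h
    · simp only [pvFirstWordA, hm, if_false] at h
      intro p hp
      rcases List.mem_cons.1 hp with rfl | hp'
      · exact hm
      · exact ih h p hp'

-- the per-position characterisation of A's value (i in range)
theorem pv_mSuf_some_iff (cs : List Char) (i : Nat) (hi : i < cs.length) (v : String) :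
    pvMSuf (cs.drop i) = some v ↔
      ((PySem.Chars.isdigit cs[i] = true ∧ v = String.ofList [cs[i]]) ∨
       (∃ p ∈ pvNumWords, (cs.drop i).take p.1.length = p.1 ∧ v = p.2)) := by
  rw [List.drop_eq_getElem_cons hi]
  constructor
  · intro h
    by_cases hd : PySem.Chars.isdigit cs[i]
    · left
      simp only [pvMSuf, hd, if_pos] at h
      exact ⟨hd, (Option.some.injEq _ _ ▸ h).symm⟩
    · right
      simp only [pvMSuf, hd] at h
      obtain ⟨p, hp, hv, hm⟩ := pvFirstWordA_some h
      exact ⟨p, hp, hm, hv.symm⟩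
  · rintro (⟨hd, hv⟩ | ⟨p, hp, hm, hv⟩)
    · simp [pvMSuf, hd, hv]
    · have hd : PySem.Chars.isdigit cs[i] = false := by
        by_contra hdd
        exact pv_digit_no_match hp (Bool.not_eq_false _ ▸ hdd) hm
    -- not a digit, so A's branch is the first-word loop; it finds exactly p
      simp only [pvMSuf, hd, Bool.false_eq_true, if_false]
      cases hfw : pvFirstWordA pvNumWords (cs[i] :: cs.drop (i + 1)) with
      | none => exact absurd hm (pvFirstWordA_none hfw p hp)
      | some v' =>
        obtain ⟨q, hq, hv', hmq⟩ := pvFirstWordA_some hfw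
        rw [pv_match_unique hq hp hmq hm] at hv'
        rw [hv, ← hv']

theorem pv_mem_occ_iff (cs : List Char) (i : Nat) (v : String) :
    (i, v) ∈ pvOccPairs cs ↔
      ∃ p ∈ pvNumWords, i < cs.length ∧ (cs.drop i).take p.1.length = p.1 ∧ v = p.2 := by
  simp only [pvOccPairs, List.mem_flatMap, List.mem_map, List.mem_filter, List.mem_range,
    beq_iff_eq, Prod.mk.injEq]
  constructor
  · rintro ⟨p, hp, j, ⟨hj, hm⟩, hji, hpv⟩
    exact ⟨p, hp, hji ▸ hj, hji ▸ hm, hpv.symm⟩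
  · rintro ⟨p, hp, hi, hm, hv⟩
    exact ⟨p, hp, i, ⟨hi, hm⟩, rfl, hv.symm⟩

theorem pv_mem_digit_iff (cs : List Char) (i : Nat) (v : String) :
    (i, v) ∈ pvDigitPairs cs ↔
      i < cs.length ∧ PySem.Chars.isdigit (cs.getD i ' ') = true ∧ v = String.ofList [cs.getD i ' '] := by
  simp only [pvDigitPairs, List.mem_filterMap, List.mem_range]
  constructor
  · rintro ⟨j, hj, hsome⟩
    by_cases hd : PySem.Chars.isdigit (cs.getD j ' ')
    · rw [if_pos hd] at hsome
      have h2 : (j, String.ofList [cs.getD j ' ']) = (i, v) := Option.some.inj hsome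
      have hji : j = i := (Prod.mk.injEq _ _ _ _ ▸ h2).1
      subst hji
      exact ⟨hj, hd, ((Prod.mk.injEq _ _ _ _ ▸ h2).2).symm⟩
    · rw [if_neg hd] at hsome
      exact absurd hsome (by simp)
  · rintro ⟨hi, hd, hv⟩
    exact ⟨i, hi, by rw [if_pos hd, hv]⟩

theorem pv_mem_pvE_iff (cs : List Char) (i : Nat) (v : String) :
    (i, v) ∈ pvE cs ↔ i < cs.length ∧ pvMSuf (cs.drop i) = some v := by
  simp only [pvE, List.mem_filterMap, List.mem_range, Option.map_eq_some_iff, Prod.mk.injEq]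
  constructor
  · rintro ⟨j, hj, w, hw, hji, hwv⟩
    subst hji; subst hwv; exact ⟨hj, hw⟩
  · rintro ⟨hi, hm⟩
    exact ⟨i, hi, v, hm, rfl, rfl⟩

theorem pv_mem_iff (cs : List Char) (x : Nat × String) :
    x ∈ pvOccPairs cs ++ pvDigitPairs cs ↔ x ∈ pvE cs := by
  obtain ⟨i, v⟩ := x
  rw [List.mem_append, pv_mem_occ_iff, pv_mem_digit_iff, pv_mem_pvE_iff]
  constructor
  · rintro (⟨p, hp, hi, hm, hv⟩ | ⟨hi, hd, hv⟩)
    · exact ⟨hi, (pv_mSuf_some_iff cs i hi v).2 (Or.inr ⟨p, hp, hm, hv⟩)⟩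
    · refine ⟨hi, (pv_mSuf_some_iff cs i hi v).2 (Or.inl ?_)⟩
      rw [List.getD_eq_getElem cs ' ' hi] at hd hv
      exact ⟨hd, hv⟩
  · rintro ⟨hi, hm⟩
    rcases (pv_mSuf_some_iff cs i hi v).1 hm with ⟨hd, hv⟩ | ⟨p, hp, hmm, hv⟩
    · right
      rw [List.getD_eq_getElem cs ' ' hi]
      exact ⟨hi, hd, hv⟩
    · left
      exact ⟨p, hp, hi, hmm, hv⟩

theorem pvE_pairwise (cs : List Char) : (pvE cs).Pairwise (fun a b => a.1 < b.1) := by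
  unfold pvE
  rw [List.pairwise_filterMap]
  refine List.pairwise_lt_range.imp (fun {a b} hab => ?_)
  intro x hx y hy
  obtain ⟨w, _, hxa⟩ := Option.map_eq_some_iff.1 hx
  obtain ⟨w', _, hyb⟩ := Option.map_eq_some_iff.1 hy
  rw [← hxa, ← hyb]
  exact hab

theorem pvE_nodup (cs : List Char) : (pvE cs).Nodup :=
  (pvE_pairwise cs).imp fun h heq => absurd (heq ▸ h) (lt_irrefl _)

theorem pv_lhs_nodup (cs : List Char) : (pvOccPairs cs ++ pvDigitPairs cs).Nodup := by
  rw [List.nodup_append]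
  refine ⟨?_, ?_, ?_⟩
  · unfold pvOccPairs
    rw [List.nodup_flatMap]
    constructor
    · intro p _
      refine ((List.nodup_range).filter _).map ?_
      intro a b hab
      simpa using hab
    · have hnd : pvNumWords.Nodup := by decide
      refine hnd.imp_of_mem (fun {p q} hp hq hne => ?_)
      rw [Function.onFun, List.disjoint_left]
      intro x hx1 hx2
      simp only [List.mem_map, List.mem_filter, List.mem_range, beq_iff_eq] at hx1 hx2
      obtain ⟨j, ⟨_, hmp⟩, hxj⟩ := hx1
      obtain ⟨j', ⟨_, hmq⟩, hxj'⟩ := hx2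
      have hjj : j' = j := by rw [← hxj] at hxj'; exact (Prod.mk.injEq _ _ _ _ ▸ hxj').1
      exact hne (pv_match_unique hp hq hmp (hjj ▸ hmq))
  · have hpw : (pvDigitPairs cs).Pairwise (fun a b => a.1 < b.1) := by
      unfold pvDigitPairs
      rw [List.pairwise_filterMap]
      refine List.pairwise_lt_range.imp (fun {a b} hab => ?_)
      intro x hx y hy
      have hxa : x.1 = a := by
        by_cases hd : PySem.Chars.isdigit (cs.getD a ' ')
        · rw [if_pos hd] at hx
          rw [← Option.some.inj hx]
        · rw [if_neg hd] at hx
          exact absurd hx (by simp)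
      have hyb : y.1 = b := by
        by_cases hd : PySem.Chars.isdigit (cs.getD b ' ')
        · rw [if_pos hd] at hy
          rw [← Option.some.inj hy]
        · rw [if_neg hd] at hy
          exact absurd hy (by simp)
      rw [hxa, hyb]
      exact hab
    exact hpw.imp fun h heq => absurd (heq ▸ h) (lt_irrefl _)
  · intro a ha b hb hab
    obtain ⟨i, v⟩ := a
    rw [pv_mem_occ_iff] at ha
    rw [← hab, pv_mem_digit_iff] at hb
    obtain ⟨p, hp, hi, hm, _⟩ := ha
    obtain ⟨_, hd, _⟩ := hb
    rw [List.getD_eq_getElem cs ' ' hi] at hd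
    rw [List.drop_eq_getElem_cons hi] at hm
    exact pv_digit_no_match hp hd hm

-- ===== VERDICT (by name: the statement is the Claim_ definition above) =====
theorem find_numberlike_values_spec : Claim_equal_find_numberlike_values := by
  intro s _
  unfold Spec_find_numberlike_values find_numberlike_values
  show pvLoopA s.toList =
    (PySem.List.sorted (pvOccPairs s.toList ++ pvDigitPairs s.toList) (fun p => p.1) false).map
      (fun p => p.2)
  have hperm : (pvE s.toList).Perm (pvOccPairs s.toList ++ pvDigitPairs s.toList) :=
    (List.perm_ext_iff_of_nodup (pvE_nodup _) (pv_lhs_nodup _)).2 (fun a => (pv_mem_iff _ a).symm)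
  rw [PySem.List.sorted_eq_of_perm_of_pairwise_lt _ _ (fun p : Nat × String => p.1) hperm
    (pvE_pairwise _)]
  rw [pvLoopA_eq]
  simp [pvE, List.map_filterMap, Option.map_map, Function.comp_def]
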